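-- pv_equiv track=rewrite | github.com/Khajz/cvKucuk_buyukProjeler | Metin Düzenleme/bosluk_tekrarEdenleriSilme.py | temizleme
-- ===== SOURCE A (Python) =====
-- def temizleme(metin): #Bu fonksiyon tekrar eden özel simgeleri, boşlukları, yanlış yerde olan büyük harfleri temizler
--     # tekrarsiz=""
--     # onceki_karakter=""
--     # for karakter in metin:
--     #     if karakter!=onceki_karakter:
--     #         tekrarsiz+=karakter
--     #         onceki_karakter=karakter
--     tekrarsiz=""
--     onceki_karakter=""
--
--     for karakter in metin:
--         if karakter=='.' and onceki_karakter=='.':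
--             continue
--         elif karakter==',' and onceki_karakter==',':
--             continue
--         elif karakter=='?' and onceki_karakter=='?':
--             continue
--         elif karakter=='!' and onceki_karakter=='!':
--             continue
--         elif karakter=="'" and onceki_karakter=="'":
--             continue
--         elif karakter==":" and onceki_karakter==":":
--             continue
--         elif karakter==";" and onceki_karakter==";":
--             continue
--         elif karakter==' ' and onceki_karakter==' ':
--             continue
--         elif karakter=='$' and onceki_karakter=='$':
--             continue
--         elif karakter=='#' and onceki_karakter=='#':
--             continue
--         else:
--            tekrarsiz+=karakter
--
--         onceki_karakter=karakter
--
--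
--     duzenli=tekrarsiz.lower() and tekrarsiz.capitalize()
--
--     sonuc=""
--     bharf=True
--
--     for karakter in duzenli:
--         if karakter=='.' or karakter=='?' or karakter=='!':
--             bharf=True
--             sonuc+=karakter
--         elif bharf and karakter.isalpha():
--             sonuc+=karakter.upper()
--             bharf=False
--         else: sonuc+=karakter
--     return sonuc
-- ===== SOURCE B (Python) =====
-- from itertools import groupby
--
-- _SPECIALS = set(".,?!':; $#")
--
--
-- def temizleme(metin):
--     # collapse runs of the special characters to a single occurrence
--     tekrarsiz = ''.join(k if k in _SPECIALS else ''.join(g)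
--                         for k, g in groupby(metin))
--     # lowercase everything, then capitalize the first letter of each sentence
--     sonuc = []
--     bharf = True
--     for k in tekrarsiz.lower():
--         if k in '.?!':
--             bharf = True
--         elif bharf and k.isalpha():
--             k = k.upper()
--             bharf = False
--         sonuc.append(k)
--     return ''.join(sonuc)
-- ===== Notes on version B (the rewrite author's own statement) =====
-- stated objective: idiomatic
-- what changed: B collapses runs of the special characters with a single itertools.groupby run scan instead of A's char-by-previous-char comparison chain, and replaces the string-truthiness capitalize trick by simply lowercasing the text before the sentence-capitalization pass.
import Mathlib
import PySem

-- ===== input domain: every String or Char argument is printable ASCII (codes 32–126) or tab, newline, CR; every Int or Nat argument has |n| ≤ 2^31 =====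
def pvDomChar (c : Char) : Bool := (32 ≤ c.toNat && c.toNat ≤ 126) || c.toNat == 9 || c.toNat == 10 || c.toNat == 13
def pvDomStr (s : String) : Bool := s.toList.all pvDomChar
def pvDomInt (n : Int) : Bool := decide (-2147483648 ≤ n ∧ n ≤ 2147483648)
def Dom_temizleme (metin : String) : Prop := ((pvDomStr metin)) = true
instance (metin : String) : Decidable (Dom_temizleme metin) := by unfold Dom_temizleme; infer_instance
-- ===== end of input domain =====

-- B collapses runs of the special characters with a groupby-style run scan and drops the
-- capitalize() call in favour of lowercasing before the sentence-capitalization pass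
-- (objective: simpler/idiomatic; same result).

-- ===== PORT A =====
-- one iteration of A's first loop: state = (tekrarsiz, onceki_karakter); 'continue' leaves the state
def pvA_step (st : List Char × Option Char) (karakter : Char) : List Char × Option Char :=
  if karakter = '.' ∧ st.2 = some '.' then st
  else if karakter = ',' ∧ st.2 = some ',' then st
  else if karakter = '?' ∧ st.2 = some '?' then st
  else if karakter = '!' ∧ st.2 = some '!' then st
  else if karakter = '\'' ∧ st.2 = some '\'' then st
  else if karakter = ':' ∧ st.2 = some ':' then st
  else if karakter = ';' ∧ st.2 = some ';' then st
  else if karakter = ' ' ∧ st.2 = some ' ' then st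
  else if karakter = '$' ∧ st.2 = some '$' then st
  else if karakter = '#' ∧ st.2 = some '#' then st
  else (st.1 ++ [karakter], some karakter)

-- Python str.capitalize(), hand-ported: first char title-cased, rest lowered (exact on ASCII,
-- where title-casing a single char is upperChar)
def pvA_cap (s : List Char) : List Char :=
  match s with
  | [] => []
  | c :: rest => PySem.Chars.upperChar c :: PySem.Chars.lower rest

-- one iteration of A's second loop: state = (sonuc, bharf)
def pvA_pass2step (st : List Char × Bool) (karakter : Char) : List Char × Bool :=
  if karakter = '.' ∨ karakter = '?' ∨ karakter = '!' then (st.1 ++ [karakter], true)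
  else if st.2 ∧ PySem.Chars.isalpha karakter then (st.1 ++ [PySem.Chars.upperChar karakter], false)
  else (st.1 ++ [karakter], st.2)

def temizleme (metin : String) : String :=
  let tekrarsiz := (metin.toList.foldl pvA_step ([], none)).1
  -- 'tekrarsiz.lower() and tekrarsiz.capitalize()': left operand if it is falsy (empty), else right
  let l := PySem.Chars.lower tekrarsiz
  let duzenli := if l = [] then l else pvA_cap tekrarsiz
  String.mk ((duzenli.foldl pvA_pass2step ([], true)).1)

-- ===== PORT B =====
def pvB_specials : List Char := ['.', ',', '?', '!', '\'', ':', ';', ' ', '$', '#']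

-- itertools.groupby-style run collapsing: emit a special char once per run, other runs unchanged
def pvB_collapse : List Char → List Char
  | [] => []
  | c :: rest =>
    (if c ∈ pvB_specials then [c] else c :: rest.takeWhile (· == c))
      ++ pvB_collapse (rest.dropWhile (· == c))
termination_by cs => cs.length
decreasing_by
  simpa using Nat.lt_succ_of_le (List.length_dropWhile_le _ _)

-- one iteration of B's output loop
def pvB_pass2step (st : List Char × Bool) (k : Char) : List Char × Bool :=
  if k ∈ ['.', '?', '!'] then (st.1 ++ [k], true)
  else if st.2 && PySem.Chars.isalpha k then (st.1 ++ [PySem.Chars.upperChar k], false)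
  else (st.1 ++ [k], st.2)

def temizleme_alt (metin : String) : String :=
  String.mk (((PySem.Chars.lower (pvB_collapse metin.toList)).foldl pvB_pass2step ([], true)).1)

-- ===== PRECONDITION & SPEC =====
def Spec_temizleme (metin : String) (out : String) : Prop := out = temizleme_alt metin
instance (metin : String) (out : String) : Decidable (Spec_temizleme metin out) := by unfold Spec_temizleme; infer_instance

-- ===== CLAIM (what is proved, stated in full; the proofs are below) =====
def Claim_equal_temizleme : Prop := ∀ (metin : String), Dom_temizleme metin → Spec_temizleme metin (temizleme metin)

-- ===== LEMMAS AND PROOFS =====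

-- reference collapse: keep a char unless it is special and equal to the previous char
def pvCollapseR (p : Option Char) : List Char → List Char
  | [] => []
  | c :: cs => (if c ∈ pvB_specials ∧ p = some c then [] else [c]) ++ pvCollapseR (some c) cs

theorem pvA_step_eq (a : List Char) (p : Option Char) (c : Char) :
    pvA_step (a, p) c =
      (a ++ (if c ∈ pvB_specials ∧ p = some c then [] else [c]), some c) := by
  unfold pvA_step
  split_ifs with h1 h2 h3 h4 h5 h6 h7 h8 h9 h10 <;> simp_all [pvB_specials]

theorem pvA_fold_eq (cs : List Char) : ∀ (a : List Char) (p : Option Char),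
    (cs.foldl pvA_step (a, p)).1 = a ++ pvCollapseR p cs := by
  induction cs with
  | nil => intro a p; simp [pvCollapseR]
  | cons c cs ih =>
    intro a p
    rw [List.foldl_cons, pvA_step_eq, pvCollapseR]
    rw [ih]
    simp

theorem pvCollapseR_head_ne (c d : Char) (ds : List Char) (h : d ≠ c) :
    pvCollapseR (some c) (d :: ds) = pvCollapseR none (d :: ds) := by
  simp [pvCollapseR, h.symm]

theorem pvCollapseR_run (c : Char) (tail : List Char) :
    ∀ run : List Char, (∀ x ∈ run, x = c) →
      pvCollapseR (some c) (run ++ tail) =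
        (if c ∈ pvB_specials then [] else run) ++ pvCollapseR (some c) tail := by
  intro run
  induction run with
  | nil => intro _; simp
  | cons x xs ih =>
    intro hall
    have hx : x = c := hall x (by simp)
    subst hx
    have := ih (fun y hy => hall y (by simp [hy]))
    by_cases hs : x ∈ pvB_specials <;>
      simp [pvCollapseR, hs, this]

theorem pvB_collapse_eq (cs : List Char) : pvB_collapse cs = pvCollapseR none cs := by
  induction cs using pvB_collapse.induct with
  | case1 => simp [pvB_collapse, pvCollapseR]
  | case2 c rest ih =>
    rw [pvB_collapse, pvCollapseR]
    have hsplit : rest.takeWhile (· == c) ++ rest.dropWhile (· == c) = rest :=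
      List.takeWhile_append_dropWhile
    have hall : ∀ x ∈ rest.takeWhile (· == c), x = c := by
      intro x hx
      have := List.mem_takeWhile_imp hx
      simpa using this
    have htail : pvCollapseR (some c) (rest.dropWhile (· == c)) =
        pvCollapseR none (rest.dropWhile (· == c)) := by
      have hd := List.head?_dropWhile_not (· == c) rest
      cases hdw : rest.dropWhile (· == c) with
      | nil => rfl
      | cons d ds =>
        rw [hdw] at hd
        simp at hd
        exact pvCollapseR_head_ne c d ds hd
    calc (if c ∈ pvB_specials then [c] else c :: rest.takeWhile (· == c))
          ++ pvB_collapse (rest.dropWhile (· == c))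
        = (if c ∈ pvB_specials then [c] else c :: rest.takeWhile (· == c))
          ++ pvCollapseR (some c) (rest.dropWhile (· == c)) := by rw [ih, htail]
      _ = [c] ++ pvCollapseR (some c) (rest.takeWhile (· == c) ++ rest.dropWhile (· == c)) := by
            rw [pvCollapseR_run c _ _ hall]
            by_cases hs : c ∈ pvB_specials <;> simp [hs]
      _ = (if c ∈ pvB_specials ∧ (none : Option Char) = some c then [] else [c])
          ++ pvCollapseR (some c) rest := by simp [hsplit]

theorem pvCollapseR_subset (cs : List Char) : ∀ (p : Option Char) (x : Char),
    x ∈ pvCollapseR p cs → x ∈ cs := by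
  induction cs with
  | nil => intro p x h; simp [pvCollapseR] at h
  | cons c cs ih =>
    intro p x h
    rw [pvCollapseR] at h
    rcases List.mem_append.1 h with h | h
    · split at h <;> simp_all
    · exact List.mem_cons_of_mem _ (ih _ _ h)

theorem pv_steps_eq : pvA_pass2step = pvB_pass2step := by
  funext st k
  unfold pvA_pass2step pvB_pass2step
  obtain ⟨a, b⟩ := st
  cases b <;> simp

theorem pv_char_lemma : ∀ n : Nat, n < 128 →
    pvB_pass2step ([], true) (PySem.Chars.upperChar (Char.ofNat n)) =
      pvB_pass2step ([], true) (PySem.Chars.lowerChar (Char.ofNat n)) := by decide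

theorem pv_first_char (c : Char) (h : pvDomChar c = true) :
    pvB_pass2step ([], true) (PySem.Chars.upperChar c) =
      pvB_pass2step ([], true) (PySem.Chars.lowerChar c) := by
  have hlt : c.toNat < 128 := by
    simp [pvDomChar] at h
    omega
  have := pv_char_lemma c.toNat hlt
  rwa [Char.ofNat_toNat] at this

-- ===== VERDICT (by name: the statement is the Claim_ definition above) =====
theorem temizleme_spec : Claim_equal_temizleme := by
  intro metin hdom
  unfold Spec_temizleme temizleme temizleme_alt
  rw [pv_steps_eq, pvB_collapse_eq, pvA_fold_eq]
  simp only [List.nil_append]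
  cases ht : pvCollapseR none metin.toList with
  | nil => simp [PySem.Chars.lower]
  | cons c rest =>
    have hne : PySem.Chars.lower (c :: rest) ≠ [] := by simp [PySem.Chars.lower]
    have hcdom : pvDomChar c = true := by
      have hmem : c ∈ metin.toList := by
        apply pvCollapseR_subset _ none
        rw [ht]; simp
      unfold Dom_temizleme pvDomStr at hdom
      exact List.all_eq_true.1 hdom c hmem
    have hlow : PySem.Chars.lower (c :: rest) =
        PySem.Chars.lowerChar c :: PySem.Chars.lower rest := by
      simp [PySem.Chars.lower]
    rw [if_neg hne, pvA_cap, hlow, List.foldl_cons, List.foldl_cons, pv_first_char c hcdom]
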